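-- pv_equiv track=rewrite | github.com/jjaguirr/ai-agency-platform | src/communication/channel_adapters.py | _split_run_on_sentences
-- ===== SOURCE A (Python) =====
-- from typing import Dict, List, Optional, Any, Union
--
-- def _split_run_on_sentences(content: str) -> List[str]:
--     """Split run-on sentences into proper sentences"""
--
--     # Simple sentence boundary detection
--     # Look for conjunctions and break there
--     conjunctions = [
--         " and ", " but ", " or ", " so ", " because ", " since ", " although ", " while "
--     ]
--
--     sentences = [content]
--
--     for conjunction in conjunctions:
--         new_sentences = []
--         for sentence in sentences:
--             if conjunction in sentence and len(sentence) > 100:  # Only split long sentences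
--                 parts = sentence.split(conjunction, 1)
--                 if len(parts) == 2:
--                     new_sentences.append(parts[0].strip())
--                     new_sentences.append(conjunction.strip().capitalize() + " " + parts[1].strip())
--                 else:
--                     new_sentences.append(sentence)
--             else:
--                 new_sentences.append(sentence)
--         sentences = new_sentences
--
--     return sentences
-- ===== SOURCE B (Python) =====
-- from typing import List
--
-- def _split_run_on_sentences(content: str) -> List[str]:
--     """Split run-on sentences into proper sentences (depth-first divide and conquer)."""
--     conjunctions = [
--         " and ", " but ", " or ", " so ", " because ", " since ", " although ", " while "
--     ]
--
--     def split_from(sentence: str, idx: int) -> List[str]: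
--         for j in range(idx, len(conjunctions)):
--             conj = conjunctions[j]
--             if conj in sentence and len(sentence) > 100:
--                 parts = sentence.split(conj, 1)
--                 return (split_from(parts[0].strip(), j + 1)
--                         + split_from(conj.strip().capitalize() + " " + parts[1].strip(), j + 1))
--         return [sentence]
--
--     return split_from(content, 0)
-- ===== Notes on version B (the rewrite author's own statement) =====
-- stated objective: alternative
-- what changed: A makes eight breadth-first passes, rebuilding the whole sentence list once per conjunction; B is a depth-first recursive divide-and-conquer that splits each sentence and recurses on both halves with the remaining conjunction suffix, visiting each fragment once.
import Mathlib
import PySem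

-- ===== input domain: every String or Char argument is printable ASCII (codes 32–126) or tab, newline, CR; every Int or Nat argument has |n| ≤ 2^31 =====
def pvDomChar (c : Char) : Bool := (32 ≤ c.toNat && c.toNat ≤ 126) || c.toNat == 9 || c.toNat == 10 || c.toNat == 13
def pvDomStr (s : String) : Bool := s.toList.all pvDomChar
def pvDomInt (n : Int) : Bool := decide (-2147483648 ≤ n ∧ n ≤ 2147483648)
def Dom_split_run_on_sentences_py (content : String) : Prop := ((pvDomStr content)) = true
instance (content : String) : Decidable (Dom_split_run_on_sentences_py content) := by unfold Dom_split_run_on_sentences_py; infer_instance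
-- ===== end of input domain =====

-- B replaces A's eight breadth-first rebuild passes over the whole sentence list by one
-- depth-first recursive divide-and-conquer on each split (objective: alternative decomposition).

-- str.capitalize() ported by hand (exact on the ASCII domain: first char uppercased, rest lowercased)
def pyCapitalize (s : String) : String :=
  String.ofList (match s.toList with
    | [] => []
    | c :: r => PySem.Chars.upperChar c :: r.map PySem.Chars.lowerChar)

-- ===== PORT A =====
def split_run_on_sentences_py (content : String) : List String :=
  let conjunctions : List String :=
    [" and ", " but ", " or ", " so ", " because ", " since ", " although ", " while "]
  conjunctions.foldl (fun sentences conjunction =>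
    sentences.foldl (fun new_sentences sentence =>
      if PySem.Str.isIn conjunction sentence = true ∧ 100 < PySem.Str.len sentence then
        -- parts = sentence.split(conjunction, 1); if len(parts) == 2: …
        match (PySem.Str.splitMax? sentence conjunction 1).getD [] with
        | [p0, p1] =>
            new_sentences ++ [PySem.Str.strip p0,
              pyCapitalize (PySem.Str.strip conjunction) ++ " " ++ PySem.Str.strip p1]
        | _ => new_sentences ++ [sentence]
      else new_sentences ++ [sentence]) []) [content]

-- ===== PORT B =====
-- split_from(sentence, idx): the index idx into the conjunction list becomes the suffix of the list
def splitFromB (s : String) : List String → List String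
  | [] => [s]
  | conj :: rest =>
    if PySem.Str.isIn conj s = true ∧ 100 < PySem.Str.len s then
      -- parts = sentence.split(conj, 1); parts[0] / parts[1] via pyGet? (none = IndexError;
      -- unreachable here: the split always yields two parts when conj is in s)
      let parts := (PySem.Str.splitMax? s conj 1).getD []
      match PySem.List.pyGet? parts 0, PySem.List.pyGet? parts 1 with
      | some left, some right =>
          splitFromB (PySem.Str.strip left) rest ++
          splitFromB (pyCapitalize (PySem.Str.strip conj) ++ " " ++ PySem.Str.strip right) rest
      | _, _ => []
    else splitFromB s rest

def split_run_on_sentences_py_alt (content : String) : List String :=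
  splitFromB content
    [" and ", " but ", " or ", " so ", " because ", " since ", " although ", " while "]

-- ===== PRECONDITION & SPEC =====
def Spec_split_run_on_sentences_py (content : String) (out : List String) : Prop := out = split_run_on_sentences_py_alt content
instance (content : String) (out : List String) : Decidable (Spec_split_run_on_sentences_py content out) := by unfold Spec_split_run_on_sentences_py; infer_instance

-- ===== CLAIM (what is proved, stated in full; the proofs are below) =====
def Claim_equal_split_run_on_sentences_py : Prop := ∀ (content : String), Dom_split_run_on_sentences_py content → Spec_split_run_on_sentences_py content (split_run_on_sentences_py content)

-- ===== LEMMAS AND PROOFS =====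

-- per-sentence action of one pass of A
def stepA (conj s : String) : List String :=
  if PySem.Str.isIn conj s = true ∧ 100 < PySem.Str.len s then
    match (PySem.Str.splitMax? s conj 1).getD [] with
    | [p0, p1] => [PySem.Str.strip p0,
        pyCapitalize (PySem.Str.strip conj) ++ " " ++ PySem.Str.strip p1]
    | _ => [s]
  else [s]

lemma go_zero (sep : List Char) (fuel : Nat) (l cur : List Char) (acc : List (List Char)) :
    PySem.Chars.splitOnMax.go sep fuel 0 l cur acc = ((cur.reverse ++ l) :: acc).reverse := by
  cases fuel with
  | zero => simp [PySem.Chars.splitOnMax.go]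
  | succ f => cases l with
    | nil => simp [PySem.Chars.splitOnMax.go]
    | cons c r => simp [PySem.Chars.splitOnMax.go]

lemma go_one (sep : List Char) (hsep : sep ≠ []) :
    ∀ (fuel : Nat) (l cur : List Char) (acc : List (List Char)),
      l.length < fuel → sep <:+: l →
      ∃ a b, PySem.Chars.splitOnMax.go sep fuel 1 l cur acc = acc.reverse ++ [a, b] := by
  intro fuel
  induction fuel with
  | zero => intro l cur acc h; omega
  | succ f ih =>
    intro l cur acc hlen hinf
    cases l with
    | nil => exact absurd (List.eq_nil_of_infix_nil hinf) hsep
    | cons c r =>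
      by_cases hp : sep.isPrefixOf (c :: r) = true
      · refine ⟨cur.reverse, List.drop sep.length (c :: r), ?_⟩
        simp only [PySem.Chars.splitOnMax.go, hp]
        rw [go_zero]
        simp
      · have hinf' : sep <:+: r := by
          rcases (List.infix_cons_iff).1 hinf with h | h
          · exact absurd (List.isPrefixOf_iff_prefix.2 h) hp
          · exact h
        obtain ⟨a, b, hab⟩ := ih r (c :: cur) acc (by simpa using Nat.lt_of_succ_lt_succ hlen) hinf'
        refine ⟨a, b, ?_⟩
        simp only [PySem.Chars.splitOnMax.go, hp]
        simpa using hab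

lemma splitMax_two (s conj : String) (hc : conj.toList ≠ [])
    (hin : PySem.Str.isIn conj s = true) :
    ∃ a b, (PySem.Str.splitMax? s conj 1).getD [] = [a, b] := by
  have hinf : conj.toList <:+: s.toList := (PySem.Str.isIn_iff_infix _ _).1 hin
  obtain ⟨a, b, hab⟩ :=
    go_one conj.toList hc (s.toList.length + 1) s.toList [] [] (Nat.lt_succ_self _) hinf
  refine ⟨String.ofList a, String.ofList b, ?_⟩
  have hne : conj.toList.isEmpty = false := by
    cases h : conj.toList with
    | nil => exact absurd h hc
    | cons x xs => simp
  simp only [PySem.Str.splitMax?, PySem.Chars.splitMax?, PySem.Chars.splitOnMax, hne,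
    Bool.false_eq_true, if_false, Option.map_some, Option.getD_some]
  rw [if_neg (by norm_num), Int.toNat_one, hab]
  simp

-- one inner-loop step of A appends exactly stepA
lemma stepA_eq (conj : String) (init : List String) (s : String) :
    (if PySem.Str.isIn conj s = true ∧ 100 < PySem.Str.len s then
        match (PySem.Str.splitMax? s conj 1).getD [] with
        | [p0, p1] =>
            init ++ [PySem.Str.strip p0,
              pyCapitalize (PySem.Str.strip conj) ++ " " ++ PySem.Str.strip p1]
        | _ => init ++ [s]
      else init ++ [s]) = init ++ stepA conj s := by
  unfold stepA
  by_cases h : PySem.Str.isIn conj s = true ∧ 100 < PySem.Str.len s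
  · rw [if_pos h, if_pos h]
    generalize (PySem.Str.splitMax? s conj 1).getD [] = parts
    rcases parts with _ | ⟨a, _ | ⟨b, _ | ⟨c, t⟩⟩⟩ <;> rfl
  · rw [if_neg h, if_neg h]

lemma inner_foldl (conj : String) (ss : List String) (init : List String) :
    ss.foldl (fun new_sentences sentence =>
      if PySem.Str.isIn conj sentence = true ∧ 100 < PySem.Str.len sentence then
        match (PySem.Str.splitMax? sentence conj 1).getD [] with
        | [p0, p1] =>
            new_sentences ++ [PySem.Str.strip p0,
              pyCapitalize (PySem.Str.strip conj) ++ " " ++ PySem.Str.strip p1]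
        | _ => new_sentences ++ [sentence]
      else new_sentences ++ [sentence]) init
    = init ++ ss.flatMap (stepA conj) := by
  induction ss generalizing init with
  | nil => simp
  | cons s rest ih =>
    rw [List.foldl_cons, stepA_eq, ih, List.flatMap_cons, List.append_assoc]

-- the depth-first recursion absorbs one pass of A
lemma stepA_flatMap (conj s : String) (hc : conj.toList ≠ []) (rest : List String) :
    (stepA conj s).flatMap (fun t => splitFromB t rest) = splitFromB s (conj :: rest) := by
  unfold stepA
  rw [splitFromB.eq_2]
  by_cases h : PySem.Str.isIn conj s = true ∧ 100 < PySem.Str.len s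
  · obtain ⟨a, b, hab⟩ := splitMax_two s conj hc h.1
    rw [if_pos h, if_pos h, hab]
    simp only [List.flatMap_cons, List.flatMap_nil, List.append_nil,
      PySem.List.pyGet?]
    rfl
  · rw [if_neg h, if_neg h]
    simp only [List.flatMap_cons, List.flatMap_nil, List.append_nil]

lemma main_lemma :
    ∀ (conjs : List String), (∀ c ∈ conjs, c.toList ≠ []) →
    ∀ (ss : List String),
      conjs.foldl (fun sentences conj => sentences.flatMap (stepA conj)) ss
        = ss.flatMap (fun s => splitFromB s conjs) := by
  intro conjs
  induction conjs with
  | nil => intro _ ss; simp [splitFromB]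
  | cons c rest ih =>
    intro hne ss
    rw [List.foldl_cons, ih (fun x hx => hne x (List.mem_cons_of_mem _ hx))]
    rw [List.flatMap_assoc]
    exact List.flatMap_congr (fun s _ => stepA_flatMap c s (hne c (List.mem_cons_self)) rest)

-- ===== VERDICT (by name: the statement is the Claim_ definition above) =====
theorem split_run_on_sentences_py_spec : Claim_equal_split_run_on_sentences_py := by
  intro content _
  unfold Spec_split_run_on_sentences_py split_run_on_sentences_py split_run_on_sentences_py_alt
  rw [PySem.List.foldl_congr_mem _ _
      (fun sentences conj => sentences.flatMap (stepA conj)) _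
      (fun acc x _ => inner_foldl x acc [])]
  rw [main_lemma _ (by decide)]
  simp
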